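-- pv_equiv track=rewrite | github.com/Sniggdha/Rubiks-Cube-Solver-Constraint-Based- | Rubiks_Cube_Solver.py | get_restricted_faces
-- ===== SOURCE A (Python) =====
-- CUBIE_IDS = {
--     'U': [37, 38, 39, 40, 41, 42, 43, 44, 45],
--     'L': [28, 29, 30, 31, 32, 33, 34, 35, 36],
--     'F': [1, 2, 3, 4, 5, 6, 7, 8, 9],
--     'R': [10, 11, 12, 13, 14, 15, 16, 17, 18],
--     'B': [19, 20, 21, 22, 23, 24, 25, 26, 27],
--     'D': [46, 47, 48, 49, 50, 51, 52, 53, 54]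
-- }
--
-- def get_restricted_faces(fixed_cubie):
--     """
--     Determines which faces of the Rubik's Cube are restricted by the position of a fixed cubie.
--     This function checks the positions of the fixed cubie and adds the affected faces to the restricted set.
--
--     Parameters:
--     fixed_cubie (list): A list of cubie identifiers that are fixed in position.
--
--     Returns:
--     set: A set of restricted face identifiers ('U', 'D', 'F', 'B', 'L', 'R').
--     """
--     # Initialize an empty set to hold restricted face identifiers
--     restricted_faces = set()
--
--     # Iterate over each cubie in the provided fixed_cubie list
--     for cubie in fixed_cubie:
--         # Check if the cubie belongs to the upper face
--         if cubie in CUBIE_IDS['U']: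
--             restricted_faces.add('U')  # Add 'U' to the restricted faces set
--
--         if cubie in CUBIE_IDS['D']:
--             restricted_faces.add('D')
--
--         if cubie in CUBIE_IDS['F']:
--             restricted_faces.add('F')
--
--         if cubie in CUBIE_IDS['B']:
--             restricted_faces.add('B')
--
--         if cubie in CUBIE_IDS['L']:
--             restricted_faces.add('L')
--
--         if cubie in CUBIE_IDS['R']:
--             restricted_faces.add('R')
--
--     # Return the set of restricted faces
--     return restricted_faces
-- ===== SOURCE B (Python) =====
-- CUBIE_IDS = {
--     'U': [37, 38, 39, 40, 41, 42, 43, 44, 45],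
--     'L': [28, 29, 30, 31, 32, 33, 34, 35, 36],
--     'F': [1, 2, 3, 4, 5, 6, 7, 8, 9],
--     'R': [10, 11, 12, 13, 14, 15, 16, 17, 18],
--     'B': [19, 20, 21, 22, 23, 24, 25, 26, 27],
--     'D': [46, 47, 48, 49, 50, 51, 52, 53, 54]
-- }
--
-- # Inverse index: each cubie id maps to its single face (the six id lists are disjoint).
-- ID_TO_FACE = {i: face for face, ids in CUBIE_IDS.items() for i in ids}
--
-- def get_restricted_faces(fixed_cubie):
--     restricted_faces = set()
--     for cubie in fixed_cubie:
--         face = ID_TO_FACE.get(cubie)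
--         if face is not None:
--             restricted_faces.add(face)
--     return restricted_faces
-- ===== Notes on version B (the rewrite author's own statement) =====
-- stated objective: faster
-- what changed: Replaces the six per-cubie list-membership scans and six if-branches with a single precomputed inverse dict lookup (ID_TO_FACE) and one conditional add per cubie.
import Mathlib
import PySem

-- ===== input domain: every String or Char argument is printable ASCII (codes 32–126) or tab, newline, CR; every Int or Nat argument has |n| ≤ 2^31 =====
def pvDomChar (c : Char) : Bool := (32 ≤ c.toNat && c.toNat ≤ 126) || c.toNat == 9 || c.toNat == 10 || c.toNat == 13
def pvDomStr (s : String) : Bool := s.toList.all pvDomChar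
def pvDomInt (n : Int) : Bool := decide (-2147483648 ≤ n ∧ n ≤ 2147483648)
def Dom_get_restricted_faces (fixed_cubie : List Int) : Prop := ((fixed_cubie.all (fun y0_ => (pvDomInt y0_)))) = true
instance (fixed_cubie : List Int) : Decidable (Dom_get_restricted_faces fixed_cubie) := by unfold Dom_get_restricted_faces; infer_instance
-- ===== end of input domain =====

-- B replaces A's six per-cubie membership scans and six branches by one lookup in a
-- precomputed inverse index (idiomatic; the six id lists are disjoint). Return value only
-- (a Python set, modelled as PySem.Set).

-- ===== PORT A =====
def pvIdsU : List Int := [37, 38, 39, 40, 41, 42, 43, 44, 45]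
def pvIdsL : List Int := [28, 29, 30, 31, 32, 33, 34, 35, 36]
def pvIdsF : List Int := [1, 2, 3, 4, 5, 6, 7, 8, 9]
def pvIdsR : List Int := [10, 11, 12, 13, 14, 15, 16, 17, 18]
def pvIdsB : List Int := [19, 20, 21, 22, 23, 24, 25, 26, 27]
def pvIdsD : List Int := [46, 47, 48, 49, 50, 51, 52, 53, 54]

def get_restricted_faces (fixed_cubie : List Int) : List String :=
  fixed_cubie.foldl (fun restricted_faces cubie =>
    let restricted_faces := if pvIdsU.contains cubie then PySem.Set.add restricted_faces "U" else restricted_faces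
    let restricted_faces := if pvIdsD.contains cubie then PySem.Set.add restricted_faces "D" else restricted_faces
    let restricted_faces := if pvIdsF.contains cubie then PySem.Set.add restricted_faces "F" else restricted_faces
    let restricted_faces := if pvIdsB.contains cubie then PySem.Set.add restricted_faces "B" else restricted_faces
    let restricted_faces := if pvIdsL.contains cubie then PySem.Set.add restricted_faces "L" else restricted_faces
    if pvIdsR.contains cubie then PySem.Set.add restricted_faces "R" else restricted_faces)
    PySem.Set.empty

-- ===== PORT B =====
def pvCubieIds : List (String × List Int) :=
  [("U", pvIdsU), ("L", pvIdsL), ("F", pvIdsF), ("R", pvIdsR), ("B", pvIdsB), ("D", pvIdsD)]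

-- ID_TO_FACE = {i: face for face, ids in CUBIE_IDS.items() for i in ids}
def pvIdToFace : PySem.Dict Int String :=
  pvCubieIds.foldl (fun d p => p.2.foldl (fun d i => d.insert i p.1) d) PySem.Dict.empty

def get_restricted_faces_alt (fixed_cubie : List Int) : List String :=
  fixed_cubie.foldl (fun restricted_faces cubie =>
    match pvIdToFace.get? cubie with
    | some face => PySem.Set.add restricted_faces face
    | none => restricted_faces)
    PySem.Set.empty

-- ===== PRECONDITION & SPEC =====
def Spec_get_restricted_faces (fixed_cubie : List Int) (out : List String) : Prop := out = get_restricted_faces_alt fixed_cubie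
instance (fixed_cubie : List Int) (out : List String) : Decidable (Spec_get_restricted_faces fixed_cubie out) := by unfold Spec_get_restricted_faces; infer_instance

-- ===== CLAIM (what is proved, stated in full; the proofs are below) =====
def Claim_equal_get_restricted_faces : Prop := ∀ (fixed_cubie : List Int), Dom_get_restricted_faces fixed_cubie → Spec_get_restricted_faces fixed_cubie (get_restricted_faces fixed_cubie)

-- ===== LEMMAS AND PROOFS =====
set_option maxRecDepth 40000
set_option maxHeartbeats 2000000

-- pvIdToFace evaluated to its literal entry list.
lemma pvIdToFace_lit :
    pvIdToFace = PySem.Dict.mk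
      [(37, "U"), (38, "U"), (39, "U"), (40, "U"), (41, "U"), (42, "U"), (43, "U"), (44, "U"), (45, "U"),
       (28, "L"), (29, "L"), (30, "L"), (31, "L"), (32, "L"), (33, "L"), (34, "L"), (35, "L"), (36, "L"),
       (1, "F"), (2, "F"), (3, "F"), (4, "F"), (5, "F"), (6, "F"), (7, "F"), (8, "F"), (9, "F"),
       (10, "R"), (11, "R"), (12, "R"), (13, "R"), (14, "R"), (15, "R"), (16, "R"), (17, "R"), (18, "R"),
       (19, "B"), (20, "B"), (21, "B"), (22, "B"), (23, "B"), (24, "B"), (25, "B"), (26, "B"), (27, "B"),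
       (46, "D"), (47, "D"), (48, "D"), (49, "D"), (50, "D"), (51, "D"), (52, "D"), (53, "D"), (54, "D")] := by
  rfl

-- The two per-cubie step functions agree on every cubie id.
lemma pv_step_eq (r : List String) (c : Int) :
    (let r1 := if pvIdsU.contains c then PySem.Set.add r "U" else r
     let r2 := if pvIdsD.contains c then PySem.Set.add r1 "D" else r1
     let r3 := if pvIdsF.contains c then PySem.Set.add r2 "F" else r2
     let r4 := if pvIdsB.contains c then PySem.Set.add r3 "B" else r3
     let r5 := if pvIdsL.contains c then PySem.Set.add r4 "L" else r4
     if pvIdsR.contains c then PySem.Set.add r5 "R" else r5)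
    = (match pvIdToFace.get? c with
       | some face => PySem.Set.add r face
       | none => r) := by
  by_cases h : 1 ≤ c ∧ c ≤ 54
  · obtain ⟨h1, h2⟩ := h
    rw [pvIdToFace_lit]
    interval_cases c <;> rfl
  · have hget : pvIdToFace.get? c = none := by
      rw [pvIdToFace_lit, PySem.Dict.get?_eq_none_iff_not_mem_keys]
      simp only [PySem.Dict.keys_mk, List.map_cons, List.map_nil, List.mem_cons, List.not_mem_nil]
      intro hm
      simp only [or_false] at hm
      omega
    have hU : c ∉ pvIdsU := by simp [pvIdsU]; omega
    have hL : c ∉ pvIdsL := by simp [pvIdsL]; omega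
    have hF : c ∉ pvIdsF := by simp [pvIdsF]; omega
    have hR : c ∉ pvIdsR := by simp [pvIdsR]; omega
    have hB : c ∉ pvIdsB := by simp [pvIdsB]; omega
    have hD : c ∉ pvIdsD := by simp [pvIdsD]; omega
    simp [hU, hL, hF, hR, hB, hD, hget]

lemma pv_fold_eq (xs : List Int) (r : List String) :
    xs.foldl (fun restricted_faces cubie =>
      let restricted_faces := if pvIdsU.contains cubie then PySem.Set.add restricted_faces "U" else restricted_faces
      let restricted_faces := if pvIdsD.contains cubie then PySem.Set.add restricted_faces "D" else restricted_faces
      let restricted_faces := if pvIdsF.contains cubie then PySem.Set.add restricted_faces "F" else restricted_faces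
      let restricted_faces := if pvIdsB.contains cubie then PySem.Set.add restricted_faces "B" else restricted_faces
      let restricted_faces := if pvIdsL.contains cubie then PySem.Set.add restricted_faces "L" else restricted_faces
      if pvIdsR.contains cubie then PySem.Set.add restricted_faces "R" else restricted_faces) r
    = xs.foldl (fun restricted_faces cubie =>
        match pvIdToFace.get? cubie with
        | some face => PySem.Set.add restricted_faces face
        | none => restricted_faces) r := by
  induction xs generalizing r with
  | nil => rfl
  | cons c xs ih =>
    simp only [List.foldl]
    rw [pv_step_eq r c]
    exact ih _

-- ===== VERDICT (by name: the statement is the Claim_ definition above) =====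
theorem get_restricted_faces_spec : Claim_equal_get_restricted_faces := by
  intro fixed_cubie _
  unfold Spec_get_restricted_faces get_restricted_faces get_restricted_faces_alt
  exact pv_fold_eq fixed_cubie PySem.Set.empty
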